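-- pv_equiv track=rewrite | github.com/koliaest1/dominoesGame | Dominoes/task/dominoes/dominoes.py | evaluate_dominoes
-- ===== SOURCE A (Python) =====
-- def evaluate_dominoes(computer_dominoes, stock_dominoes):
--     rating = {}
--     for i in range(0, 7):
--         count = 0
--         for domino in computer_dominoes:
--             if i in domino and domino[0] != domino[1]:
--                 count += 1
--             elif i in domino and domino[0] == domino[1]:
--                 count += 2
--         for domino in stock_dominoes:
--             if i in domino and domino[0] != domino[1]:
--                 count += 1
--             elif i in domino and domino[0] == domino[1]:
--                 count += 2
--         rating[i] = count
--     return rating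
-- ===== SOURCE B (Python) =====
-- def evaluate_dominoes(computer_dominoes, stock_dominoes):
--     rating = {i: 0 for i in range(7)}
--     for domino in computer_dominoes + stock_dominoes:
--         weight = 2 if domino[0] == domino[1] else 1
--         for v in set(domino):
--             if v in rating:
--                 rating[v] += weight
--     return rating
-- ===== Notes on version B (the rewrite author's own statement) =====
-- stated objective: alternative
-- what changed: Transposes the gather loops (for each value 0-6, scan both lists) into one scatter pass over the concatenated list that increments a pre-initialised 0..6 counter dict per domino, so the data is traversed once instead of 14 times.
import Mathlib
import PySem

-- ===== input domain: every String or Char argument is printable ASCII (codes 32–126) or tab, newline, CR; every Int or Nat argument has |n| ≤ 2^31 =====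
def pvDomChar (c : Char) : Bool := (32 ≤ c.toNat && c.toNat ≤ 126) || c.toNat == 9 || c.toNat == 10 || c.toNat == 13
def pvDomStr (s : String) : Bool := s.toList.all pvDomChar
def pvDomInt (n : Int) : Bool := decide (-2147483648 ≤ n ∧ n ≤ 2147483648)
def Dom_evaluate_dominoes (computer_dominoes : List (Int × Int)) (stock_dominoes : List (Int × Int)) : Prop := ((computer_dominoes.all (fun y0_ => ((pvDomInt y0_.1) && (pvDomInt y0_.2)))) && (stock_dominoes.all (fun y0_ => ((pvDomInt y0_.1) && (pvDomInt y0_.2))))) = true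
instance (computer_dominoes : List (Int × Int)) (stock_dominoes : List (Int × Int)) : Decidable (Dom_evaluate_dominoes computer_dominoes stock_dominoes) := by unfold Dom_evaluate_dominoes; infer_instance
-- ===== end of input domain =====

-- B replaces A's gather (for each value 0-6, scan both domino lists) with a single scatter pass
-- over the concatenated list, updating a pre-initialised 0..6 counter dict per domino.

-- ===== PORT A =====
-- one iteration of A's inner loop body for value i ('if i in domino and ... elif ...')
def pvAStep (i : Int) (cnt : Int) (d : Int × Int) : Int :=
  if (i = d.1 ∨ i = d.2) ∧ d.1 ≠ d.2 then cnt + 1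
  else if (i = d.1 ∨ i = d.2) ∧ d.1 = d.2 then cnt + 2
  else cnt

def evaluate_dominoes (computer_dominoes : List (Int × Int)) (stock_dominoes : List (Int × Int)) : List (Int × Int) :=
  ((PySem.List.pyRange 0 7).foldl (fun rating i =>
      let count := computer_dominoes.foldl (pvAStep i) 0
      let count := stock_dominoes.foldl (pvAStep i) count
      rating.insert i count)
    PySem.Dict.empty).items

-- ===== PORT B =====
-- 'if v in rating: rating[v] += weight'
def pvBUpd (w : Int) (r : PySem.Dict Int Int) (v : Int) : PySem.Dict Int Int :=
  if r.contains v then r.modify v 0 (· + w) else r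

def evaluate_dominoes_alt (computer_dominoes : List (Int × Int)) (stock_dominoes : List (Int × Int)) : List (Int × Int) :=
  ((computer_dominoes ++ stock_dominoes).foldl (fun rating d =>
        let weight : Int := if d.1 = d.2 then 2 else 1
        (PySem.Set.ofList [d.1, d.2]).foldl (pvBUpd weight) rating)
      ((PySem.List.pyRange 0 7).foldl (fun r i => r.insert i 0) PySem.Dict.empty)).items

-- ===== PRECONDITION & SPEC =====
def Spec_evaluate_dominoes (computer_dominoes : List (Int × Int)) (stock_dominoes : List (Int × Int)) (out : List (Int × Int)) : Prop := out = evaluate_dominoes_alt computer_dominoes stock_dominoes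
instance (computer_dominoes : List (Int × Int)) (stock_dominoes : List (Int × Int)) (out : List (Int × Int)) : Decidable (Spec_evaluate_dominoes computer_dominoes stock_dominoes out) := by unfold Spec_evaluate_dominoes; infer_instance

-- ===== CLAIM (what is proved, stated in full; the proofs are below) =====
def Claim_equal_evaluate_dominoes : Prop := ∀ (computer_dominoes : List (Int × Int)) (stock_dominoes : List (Int × Int)), Dom_evaluate_dominoes computer_dominoes stock_dominoes → Spec_evaluate_dominoes computer_dominoes stock_dominoes (evaluate_dominoes computer_dominoes stock_dominoes)

-- ===== LEMMAS AND PROOFS =====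

-- weight A adds for value i on domino d
def pvContrib (i : Int) (d : Int × Int) : Int :=
  if i = d.1 ∨ i = d.2 then (if d.1 = d.2 then 2 else 1) else 0

def pvTotal (i : Int) (ds : List (Int × Int)) : Int := (ds.map (pvContrib i)).sum

lemma pvAStep_eq (i cnt : Int) (d : Int × Int) : pvAStep i cnt d = cnt + pvContrib i d := by
  unfold pvAStep pvContrib
  split_ifs with h1 h2 h3 h4 h5 <;> first | rfl | omega

lemma foldl_pvAStep (ds : List (Int × Int)) (i acc : Int) :
    ds.foldl (pvAStep i) acc = acc + pvTotal i ds := by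
  induction ds generalizing acc with
  | nil => simp [pvTotal]
  | cons d ds ih => simp [List.foldl_cons, pvAStep_eq, ih, pvTotal, add_assoc]

lemma getD_mk_map (K : List Int) (g : Int → Int) (k : Int) (h : k ∈ K) :
    (PySem.Dict.mk (K.map (fun i => (i, g i)))).getD k 0 = g k := by
  induction K with
  | nil => simp at h
  | cons a K ih =>
    rw [List.map_cons]
    by_cases hk : a = k
    · subst hk; simp [PySem.Dict.getD, PySem.Dict.get?_mk_cons]
    · rcases List.mem_cons.mp h with h' | h'
      · exact absurd h'.symm hk
      · have := ih h'
        simp only [PySem.Dict.getD] at this ⊢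
        rw [PySem.Dict.get?_mk_cons]
        simp [hk, this]

lemma contains_mk_map (K : List Int) (g : Int → Int) (k : Int) :
    (PySem.Dict.mk (K.map (fun i => (i, g i)))).contains k = decide (k ∈ K) := by
  induction K with
  | nil => simp [PySem.Dict.contains]
  | cons a K ih =>
    simp only [List.map_cons, PySem.Dict.contains, List.any_cons] at ih ⊢
    by_cases hak : a = k
    · simp [hak]
    · have hka : ¬ k = a := fun e => hak e.symm
      simp [beq_iff_eq, hak, hka, ih]

lemma pvBUpd_mk_map (K : List Int) (g : Int → Int) (k w : Int) :
    pvBUpd w (PySem.Dict.mk (K.map (fun i => (i, g i)))) k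
      = PySem.Dict.mk (K.map (fun i => (i, if i = k then g i + w else g i))) := by
  unfold pvBUpd
  by_cases h : k ∈ K
  · rw [contains_mk_map]
    simp only [h, decide_true, if_true]
    unfold PySem.Dict.modify PySem.Dict.insert
    rw [contains_mk_map]
    simp only [h, decide_true, if_true, getD_mk_map K g k h]
    congr 1
    rw [List.map_map]
    apply List.map_congr_left
    intro i _
    by_cases hik : i = k
    · subst hik; simp
    · simp [hik, beq_iff_eq]
  · rw [contains_mk_map]
    simp only [h, decide_false, Bool.false_eq_true, if_false]
    congr 1
    apply List.map_congr_left
    intro i hi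
    have : i ≠ k := fun e => h (e ▸ hi)
    simp [this]

lemma step_domino (K : List Int) (g : Int → Int) (d : Int × Int) :
    (PySem.Set.ofList [d.1, d.2]).foldl (pvBUpd (if d.1 = d.2 then 2 else 1))
        (PySem.Dict.mk (K.map (fun i => (i, g i))))
      = PySem.Dict.mk (K.map (fun i => (i, g i + pvContrib i d))) := by
  by_cases hd : d.1 = d.2
  · have hset : PySem.Set.ofList [d.1, d.2] = [d.1] := by
      simp [PySem.Set.ofList, PySem.Set.empty, PySem.Set.add, hd]
    rw [hset]
    simp only [List.foldl_cons, List.foldl_nil, hd, if_true]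
    rw [pvBUpd_mk_map]
    congr 1
    apply List.map_congr_left
    intro i _
    congr 1
    unfold pvContrib
    by_cases hik : i = d.2
    · simp [hik, hd]
    · have h1 : i ≠ d.1 := by rw [hd]; exact hik
      simp [h1, hik]
  · have hset : PySem.Set.ofList [d.1, d.2] = [d.1, d.2] := by
      simp [PySem.Set.ofList, PySem.Set.empty, PySem.Set.add, Ne.symm hd]
    rw [hset]
    simp only [List.foldl_cons, List.foldl_nil, hd, if_false]
    rw [pvBUpd_mk_map, pvBUpd_mk_map]
    congr 1
    apply List.map_congr_left
    intro i _
    congr 1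
    unfold pvContrib
    by_cases h2 : i = d.2 <;> by_cases h1 : i = d.1 <;> simp_all

lemma B_fold (ds : List (Int × Int)) (K : List Int) (g : Int → Int) :
    (ds.foldl (fun rating d =>
        let weight : Int := if d.1 = d.2 then 2 else 1
        (PySem.Set.ofList [d.1, d.2]).foldl (pvBUpd weight) rating)
      (PySem.Dict.mk (K.map (fun i => (i, g i)))))
    = PySem.Dict.mk (K.map (fun i => (i, g i + pvTotal i ds))) := by
  induction ds generalizing g with
  | nil =>
    simp only [List.foldl_nil]
    congr 1
    apply List.map_congr_left
    intro i _
    simp [pvTotal]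
  | cons d ds ih =>
    simp only [List.foldl_cons]
    rw [step_domino K g d, ih (fun i => g i + pvContrib i d)]
    congr 1
    apply List.map_congr_left
    intro i _
    simp [pvTotal, add_assoc]

lemma A_items (c s : List (Int × Int)) :
    evaluate_dominoes c s
      = ([0, 1, 2, 3, 4, 5, 6] : List Int).map (fun i => (i, pvTotal i (c ++ s))) := by
  unfold evaluate_dominoes
  have h7 : PySem.List.pyRange 0 7 = [0, 1, 2, 3, 4, 5, 6] := by decide
  rw [h7]
  show (List.foldl (fun (d : PySem.Dict Int Int) (a : Int) =>
      d.insert a (s.foldl (pvAStep a) (c.foldl (pvAStep a) 0))) PySem.Dict.empty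
      [0, 1, 2, 3, 4, 5, 6]).items = _
  have := PySem.Dict.items_foldl_insert_fresh ([0, 1, 2, 3, 4, 5, 6] : List Int)
      (fun i => i) (fun i => s.foldl (pvAStep i) (c.foldl (pvAStep i) 0))
      PySem.Dict.empty (by intro a _; rfl) (by decide)
  simp only [PySem.Dict.empty] at this ⊢
  rw [this]
  simp only [List.nil_append]
  apply List.map_congr_left
  intro i _
  rw [foldl_pvAStep, foldl_pvAStep]
  simp [pvTotal, List.sum_append]

lemma B_items (c s : List (Int × Int)) :
    evaluate_dominoes_alt c s
      = ([0, 1, 2, 3, 4, 5, 6] : List Int).map (fun i => (i, pvTotal i (c ++ s))) := by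
  unfold evaluate_dominoes_alt
  have hinit : (PySem.List.pyRange 0 7).foldl (fun r i => r.insert i 0) PySem.Dict.empty
      = PySem.Dict.mk (([0, 1, 2, 3, 4, 5, 6] : List Int).map (fun i => (i, (fun _ : Int => (0 : Int)) i))) := by decide
  rw [hinit, B_fold (c ++ s) [0, 1, 2, 3, 4, 5, 6] (fun _ => 0)]
  simp

-- ===== VERDICT (by name: the statement is the Claim_ definition above) =====
theorem evaluate_dominoes_spec : Claim_equal_evaluate_dominoes := by
  intro c s _
  unfold Spec_evaluate_dominoes
  rw [A_items, B_items]
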